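-- pv_equiv track=rewrite | github.com/mahadevTW/py_uploader | vowel/vowels.py | is_vowel_line
-- ===== SOURCE A (Python) =====
-- vowels = set('aeiou')
--
-- def is_vowel(char):
--     return char in vowels
--
-- def is_vowel_line(line):
--     if line is None:
--         return False
--     line_vowel_set = set({})
--     for char in line:
--         if is_vowel(char):
--             line_vowel_set.add(char)
--     return len(vowels) == len(line_vowel_set)
-- ===== SOURCE B (Python) =====
-- def is_vowel_line(line):
--     if line is None:
--         return False
--     return all(v in line for v in 'aeiou')
-- ===== Notes on version B (the rewrite author's own statement) =====
-- stated objective: idiomatic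
-- what changed: Instead of one per-char Python scan accumulating a set of seen vowels and comparing set sizes, B tests each of the five fixed vowels for membership in the line with all(...), using C-level substring search.
import Mathlib
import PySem

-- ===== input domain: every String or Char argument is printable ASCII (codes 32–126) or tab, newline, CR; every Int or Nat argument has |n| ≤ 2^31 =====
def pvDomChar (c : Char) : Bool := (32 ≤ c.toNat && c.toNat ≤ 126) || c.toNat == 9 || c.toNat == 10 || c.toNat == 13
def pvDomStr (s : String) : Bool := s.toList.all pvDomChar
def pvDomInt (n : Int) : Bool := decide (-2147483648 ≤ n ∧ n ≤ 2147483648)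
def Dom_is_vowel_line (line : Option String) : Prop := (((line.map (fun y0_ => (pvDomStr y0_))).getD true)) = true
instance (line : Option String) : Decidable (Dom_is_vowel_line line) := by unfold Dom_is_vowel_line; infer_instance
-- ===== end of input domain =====

-- B replaces A's single-pass seen-vowel set and size comparison by the idiomatic
-- all(v in line ...) over the five fixed vowels; return-value equivalence proved on all inputs.

-- ===== PORT A =====
-- vowels = set('aeiou')
def pvVowels : PySem.Set Char := PySem.Set.ofList "aeiou".toList

def is_vowel (char : Char) : Bool := PySem.Set.contains pvVowels char

def is_vowel_line (line : Option String) : Bool :=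
  match line with
  | none => false
  | some l =>
    let line_vowel_set : PySem.Set Char :=
      l.toList.foldl
        (fun s char => if is_vowel char then PySem.Set.add s char else s)
        PySem.Set.empty
    PySem.Set.len pvVowels == PySem.Set.len line_vowel_set

-- ===== PORT B =====
-- 'v in line' for the one-char string v is exactly char membership in the line
def is_vowel_line_alt (line : Option String) : Bool :=
  match line with
  | none => false
  | some l => "aeiou".toList.all (fun v => l.toList.contains v)

-- ===== PRECONDITION & SPEC =====
def Spec_is_vowel_line (line : Option String) (out : Bool) : Prop := out = is_vowel_line_alt line
instance (line : Option String) (out : Bool) : Decidable (Spec_is_vowel_line line out) := by unfold Spec_is_vowel_line; infer_instance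

-- ===== CLAIM (what is proved, stated in full; the proofs are below) =====
def Claim_equal_is_vowel_line : Prop := ∀ (line : Option String), Dom_is_vowel_line line → Spec_is_vowel_line line (is_vowel_line line)

-- ===== LEMMAS AND PROOFS =====

theorem mem_vowel_fold (cs : List Char) (s : PySem.Set Char) (c : Char) :
    c ∈ cs.foldl (fun s char => if is_vowel char then PySem.Set.add s char else s) s ↔
      c ∈ s ∨ (c ∈ cs ∧ is_vowel c = true) := by
  induction cs generalizing s with
  | nil => simp
  | cons a cs ih =>
    simp only [List.foldl_cons, ih, List.mem_cons]
    by_cases h : is_vowel a = true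
    · simp only [h, if_pos]
      rw [PySem.Set.mem_add]
      constructor
      · rintro (⟨hs | rfl⟩ | h2)
        · exact Or.inl hs
        · exact Or.inr ⟨Or.inl rfl, h⟩
        · exact Or.inr ⟨Or.inr h2.1, h2.2⟩
      · rintro (hs | ⟨rfl | hm, hv⟩)
        · exact Or.inl (Or.inl hs)
        · exact Or.inl (Or.inr rfl)
        · exact Or.inr ⟨hm, hv⟩
    · simp only [h, Bool.false_eq_true]
      constructor
      · rintro (hs | h2)
        · exact Or.inl hs
        · exact Or.inr ⟨Or.inr h2.1, h2.2⟩
      · rintro (hs | ⟨rfl | hm, hv⟩)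
        · exact Or.inl hs
        · exact absurd hv h
        · exact Or.inr ⟨hm, hv⟩

theorem nodup_vowel_fold (cs : List Char) (s : PySem.Set Char) (h : s.Nodup) :
    (cs.foldl (fun s char => if is_vowel char then PySem.Set.add s char else s) s).Nodup := by
  induction cs generalizing s with
  | nil => exact h
  | cons a cs ih =>
    simp only [List.foldl_cons]
    apply ih
    split
    · exact PySem.Set.nodup_add _ _ h
    · exact h

-- ===== VERDICT (by name: the statement is the Claim_ definition above) =====
theorem is_vowel_line_spec : Claim_equal_is_vowel_line := by
  intro line _
  unfold Spec_is_vowel_line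
  cases line with
  | none => rfl
  | some l =>
    simp only [is_vowel_line, is_vowel_line_alt]
    set S := l.toList.foldl
        (fun s char => if is_vowel char then PySem.Set.add s char else s)
        PySem.Set.empty with hS
    have hmem : ∀ c, c ∈ S ↔ c ∈ l.toList ∧ is_vowel c = true := by
      intro c
      rw [hS, mem_vowel_fold]
      simp [PySem.Set.empty]
    have hpv : pvVowels = "aeiou".toList := by decide
    have hnd : S.Nodup := nodup_vowel_fold _ _ (by simp [PySem.Set.empty])
    have hsub : S ⊆ pvVowels := by
      intro c hc
      have := (hmem c).1 hc
      simpa [is_vowel, PySem.Set.contains_iff] using this.2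
    have hsp : S.Subperm pvVowels := List.subperm_of_subset hnd hsub
    rw [Bool.eq_iff_iff, beq_iff_eq, List.all_eq_true]
    constructor
    · intro hlen v hv
      have hperm : S.Perm pvVowels := by
        apply hsp.perm_of_length_le
        have : (PySem.Set.len pvVowels : Int) = PySem.Set.len S := hlen
        simp only [PySem.Set.len] at this
        omega
      have hvS : v ∈ S := hperm.mem_iff.2 (by rw [hpv]; exact hv)
      simpa using ((hmem v).1 hvS).1
    · intro hall
      have hsub' : pvVowels ⊆ S := by
        intro c hc
        have hcv : is_vowel c = true := by
          simp [is_vowel, hc]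
        have : c ∈ "aeiou".toList := by rw [hpv] at hc; exact hc
        have hcl : l.toList.contains c = true := hall c this
        exact (hmem c).2 ⟨by simpa using hcl, hcv⟩
      have hsp' : pvVowels.Subperm S :=
        List.subperm_of_subset (by rw [hpv]; decide) hsub'
      have h1 := hsp.length_le
      have h2 := hsp'.length_le
      simp only [PySem.Set.len]
      omega
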